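-- pv_equiv track=rewrite | github.com/Foursheeps/TOMIC | process_data/create_syncdata.py | get_total_cells_to_simulate
-- ===== SOURCE A (Python) =====
-- def get_total_cells_to_simulate(cells_per_organ: dict[str, int]) -> int:
--     """
--     Calculate total number of cells to simulate based on cells_per_organ mapping.
--
--     The calculation uses the formula: max_cells * n_organs, where max_cells is the
--     maximum number of cells per organ and n_organs is the number of organs.
--
--     Args:
--         cells_per_organ: Dictionary mapping organ names (str) to number of cells (int) per organ.
--             All values must be positive integers.
--
--     Returns:
--         Total number of cells (int): max_cells * n_organs, where:
--         - max_cells: Maximum value in cells_per_organ.values()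
--         - n_organs: Number of keys in cells_per_organ
--
--     Raises:
--         ValueError: If cells_per_organ is empty or contains non-positive values
--     """
--     if not cells_per_organ:
--         raise ValueError("cells_per_organ must be non-empty")
--     values = list(cells_per_organ.values())
--     if any(v <= 0 for v in values):
--         raise ValueError("All values in cells_per_organ must be positive integers")
--     max_cells = max(values)
--     return len(values) * max_cells
-- ===== SOURCE B (Python) =====
-- def get_total_cells_to_simulate(cells_per_organ: dict[str, int]) -> int:
--     if not cells_per_organ:
--         raise ValueError("cells_per_organ must be non-empty")
--     ordered = sorted(cells_per_organ.values())
--     if ordered[0] <= 0: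
--         raise ValueError("All values in cells_per_organ must be positive integers")
--     return len(ordered) * ordered[-1]
-- ===== Notes on version B (the rewrite author's own statement) =====
-- stated objective: alternative
-- what changed: B sorts the values once and reads both extremes off the ordered list: the first element (the minimum) validates positivity in O(1) instead of an any-scan, and the last element is the maximum instead of a max-scan; A's three linear passes are replaced by sort-then-endpoint-reads.
import Mathlib
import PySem

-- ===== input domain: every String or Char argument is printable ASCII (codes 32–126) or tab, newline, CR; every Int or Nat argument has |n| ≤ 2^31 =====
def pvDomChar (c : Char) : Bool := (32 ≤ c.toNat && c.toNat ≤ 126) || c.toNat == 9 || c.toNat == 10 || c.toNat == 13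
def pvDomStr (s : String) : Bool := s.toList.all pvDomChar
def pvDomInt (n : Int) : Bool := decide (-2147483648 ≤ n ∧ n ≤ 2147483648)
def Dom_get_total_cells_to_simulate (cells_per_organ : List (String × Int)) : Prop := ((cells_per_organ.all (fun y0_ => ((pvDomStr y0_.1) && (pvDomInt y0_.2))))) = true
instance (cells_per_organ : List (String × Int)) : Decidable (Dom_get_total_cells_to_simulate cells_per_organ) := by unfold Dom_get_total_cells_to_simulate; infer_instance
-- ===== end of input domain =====

-- B replaces A's scans (any-scan for positivity, max-scan) by sorting the values once and reading
-- both endpoints of the ordered list (objective: alternative algorithm, same return values; both raise identically in Python).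
-- ===== PORT A =====
-- Port of A: dict → PySem.Dict.ofList; the two ValueError inputs are excluded by Pre_ (0 returned there).
def get_total_cells_to_simulate (cells_per_organ : List (String × Int)) : Int :=
  let d := PySem.Dict.ofList cells_per_organ
  if d.items.isEmpty then 0        -- raise ValueError("cells_per_organ must be non-empty")
  else
    let values := d.values
    if values.any (fun v => decide (v ≤ 0)) then 0   -- raise ValueError("All values ... must be positive integers")
    else
      let max_cells := (PySem.List.max? values (fun y => y)).getD 0
      (values.length : Int) * max_cells

-- ===== PORT B =====
-- Port of B: sort the values; ordered[0] (the minimum) validates positivity, ordered[-1] (the maximum) gives the result.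
-- ordered[0]/ordered[-1] are in range here (the list is non-empty after the guard), so .getD 0 is never taken.
def get_total_cells_to_simulate_alt (cells_per_organ : List (String × Int)) : Int :=
  let d := PySem.Dict.ofList cells_per_organ
  if d.items.isEmpty then 0        -- raise ValueError("cells_per_organ must be non-empty")
  else
    let ordered := PySem.List.sorted d.values (fun y => y) false
    if (PySem.List.pyGet? ordered 0).getD 0 ≤ 0 then 0   -- raise ValueError("All values ... must be positive integers")
    else (ordered.length : Int) * (PySem.List.pyGet? ordered (-1)).getD 0

-- ===== PRECONDITION & SPEC =====
-- Pre_ excludes exactly the inputs where A raises ValueError: an empty dict, or a dict with a non-positive value.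
def Pre_get_total_cells_to_simulate (cells_per_organ : List (String × Int)) : Prop :=
  (PySem.Dict.ofList cells_per_organ).values ≠ [] ∧
  ∀ v ∈ (PySem.Dict.ofList cells_per_organ).values, 0 < v
instance (cells_per_organ : List (String × Int)) : Decidable (Pre_get_total_cells_to_simulate cells_per_organ) := by
  unfold Pre_get_total_cells_to_simulate; infer_instance
def pvWitness_get_total_cells_to_simulate : (List (String × Int)) := [("liver", 3), ("heart", 5)]
def Spec_get_total_cells_to_simulate (cells_per_organ : List (String × Int)) (out : Int) : Prop := out = get_total_cells_to_simulate_alt cells_per_organ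
instance (cells_per_organ : List (String × Int)) (out : Int) : Decidable (Spec_get_total_cells_to_simulate cells_per_organ out) := by unfold Spec_get_total_cells_to_simulate; infer_instance

-- ===== CLAIM (what is proved, stated in full; the proofs are below) =====
def Claim_equal_get_total_cells_to_simulate : Prop := ∀ (cells_per_organ : List (String × Int)), Dom_get_total_cells_to_simulate cells_per_organ → Pre_get_total_cells_to_simulate cells_per_organ → Spec_get_total_cells_to_simulate cells_per_organ (get_total_cells_to_simulate cells_per_organ)

-- ===== LEMMAS AND PROOFS =====
-- In a ≤-sorted list every element is at most the last one.
lemma le_getLast_of_pairwise_le (l : List Int) (hp : l.Pairwise (· ≤ ·)) (h : l ≠ [])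
    (y : Int) (hy : y ∈ l) : y ≤ l.getLast h := by
  induction l generalizing y with
  | nil => exact absurd rfl h
  | cons x t ih =>
    rw [List.pairwise_cons] at hp
    rcases List.mem_cons.mp hy with hx | ht
    · cases t with
      | nil => simp [hx]
      | cons z s =>
        rw [List.getLast_cons (by simp)]
        calc y = x := hx
          _ ≤ z := hp.1 z (List.mem_cons_self ..)
          _ ≤ _ := ih hp.2 (by simp) z (List.mem_cons_self ..)
    · have htne : t ≠ [] := List.ne_nil_of_mem ht
      rw [List.getLast_cons htne]
      exact ih hp.2 htne y ht

-- ===== VERDICT (by name: the statement is the Claim_ definition above) =====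
theorem get_total_cells_to_simulate_spec : Claim_equal_get_total_cells_to_simulate := by
  intro l _ hpre
  obtain ⟨hne, hpos⟩ := hpre
  unfold Spec_get_total_cells_to_simulate get_total_cells_to_simulate get_total_cells_to_simulate_alt
  simp only
  have hitems : ((PySem.Dict.ofList l).items.isEmpty) = false := by
    rw [List.isEmpty_eq_false_iff]
    intro hit
    exact hne (by simp [PySem.Dict.values, hit])
  rw [hitems]
  simp only [Bool.false_eq_true, if_false]
  set vs := (PySem.Dict.ofList l).values with hvs
  set ordered := PySem.List.sorted vs (fun y => y) false with hord
  have hperm : ordered.Perm vs := PySem.List.sorted_perm vs (fun y => y) false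
  have hordne : ordered ≠ [] := by
    intro h0
    rw [h0] at hperm; exact hne (List.Perm.nil_eq hperm).symm
  have hpos' : ∀ v ∈ ordered, 0 < v := fun v hv => hpos v (hperm.mem_iff.mp hv)
  obtain ⟨h0, t0, hcons⟩ := List.exists_cons_of_ne_nil hordne
  -- A's any-guard is false
  have hany : (vs.any (fun v => decide (v ≤ 0))) = false := by
    simp only [List.any_eq_false, decide_eq_true_eq]
    intro v hv; have := hpos v hv; omega
  rw [hany]
  simp only [Bool.false_eq_true, if_false]
  -- B's head-guard is false
  have hget0 : PySem.List.pyGet? ordered 0 = some h0 := by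
    rw [hcons]; exact PySem.List.pyGet?_zero_cons ..
  have hh0 : 0 < h0 := hpos' h0 (hcons ▸ List.mem_cons_self ..)
  rw [hget0]
  simp only [Option.getD_some, if_neg (by omega : ¬ h0 ≤ 0)]
  -- lengths agree
  have hlen : vs.length = ordered.length := (hperm.length_eq).symm
  -- the maxima agree
  obtain ⟨m, hm⟩ : ∃ m, PySem.List.max? vs (fun y => y) = some m := by
    cases hmx : PySem.List.max? vs (fun y => y) with
    | none => exact absurd ((PySem.List.max?_eq_none_iff _ _).mp hmx) hne
    | some m => exact ⟨m, rfl⟩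
  have hmmem : m ∈ vs := PySem.List.max?_mem hm
  have hmmax : ∀ y ∈ vs, y ≤ m := fun y hy => PySem.List.max?_isMax hm y hy
  have hlast : PySem.List.pyGet? ordered (-1) = some (ordered.getLast hordne) := by
    rw [PySem.List.pyGet?_neg_one, List.getLast?_eq_some_getLast]
  have hpair : ordered.Pairwise (· ≤ ·) := by
    simpa using PySem.List.sorted_pairwise vs (fun y => y)
  have hL : ordered.getLast hordne = m := by
    apply le_antisymm
    · exact hmmax _ (hperm.mem_iff.mp (List.getLast_mem hordne))
    · exact le_getLast_of_pairwise_le ordered hpair hordne m (hperm.mem_iff.mpr hmmem)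
  rw [hm, hlast]
  simp [hlen, hL]
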